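-- pv_equiv track=rewrite | github.com/openai/openai-cookbook | examples/evals/realtime_evals/shared/plotting_utils.py | _palette_cycle
-- ===== SOURCE A (Python) =====
-- BASELINE = "#dd7f00"
--
-- TEAL_DARK = "#1c7f77"
--
-- TEAL_LIGHT = "#3fc4b7"
--
-- BLUE_DARK = "#3266d6"
--
-- BLUE_LIGHT = "#84acd8"
--
-- ORANGE_DARK = "#cc4a06"
--
-- ORANGE_LIGHT = "#efb26d"
--
-- PURPLE_DARK = "#7b39db"
--
-- def _palette_cycle(count: int) -> list[str]:
--     base_palette = [
--         BASELINE,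
--         TEAL_DARK,
--         BLUE_DARK,
--         ORANGE_DARK,
--         PURPLE_DARK,
--         TEAL_LIGHT,
--         BLUE_LIGHT,
--         ORANGE_LIGHT,
--     ]
--     return [base_palette[index % len(base_palette)] for index in range(count)]
-- ===== SOURCE B (Python) =====
-- BASELINE = "#dd7f00"
-- TEAL_DARK = "#1c7f77"
-- TEAL_LIGHT = "#3fc4b7"
-- BLUE_DARK = "#3266d6"
-- BLUE_LIGHT = "#84acd8"
-- ORANGE_DARK = "#cc4a06"
-- ORANGE_LIGHT = "#efb26d"
-- PURPLE_DARK = "#7b39db"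
--
-- def _palette_cycle(count: int) -> list[str]:
--     base_palette = [
--         BASELINE,
--         TEAL_DARK,
--         BLUE_DARK,
--         ORANGE_DARK,
--         PURPLE_DARK,
--         TEAL_LIGHT,
--         BLUE_LIGHT,
--         ORANGE_LIGHT,
--     ]
--     reps = count // len(base_palette) + 1
--     return (base_palette * reps)[:count]
-- ===== Notes on version B (the rewrite author's own statement) =====
-- stated objective: faster
-- what changed: Replaced the per-index modulo-lookup comprehension with tile-and-truncate: replicate the whole palette enough times and slice the result to the requested length; nonpositive counts give an empty list either way.
import Mathlib
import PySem

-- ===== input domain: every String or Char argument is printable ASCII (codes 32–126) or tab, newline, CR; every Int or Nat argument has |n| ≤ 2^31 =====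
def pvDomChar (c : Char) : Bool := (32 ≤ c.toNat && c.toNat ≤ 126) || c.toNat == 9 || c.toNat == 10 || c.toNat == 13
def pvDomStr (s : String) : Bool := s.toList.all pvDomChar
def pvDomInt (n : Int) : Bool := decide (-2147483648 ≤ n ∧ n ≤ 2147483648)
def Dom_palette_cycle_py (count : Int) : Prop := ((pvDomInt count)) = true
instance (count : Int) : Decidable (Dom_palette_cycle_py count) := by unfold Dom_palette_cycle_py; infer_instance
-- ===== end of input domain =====

-- B replaces the per-index modulo-lookup comprehension by tile-and-truncate (replicate the
-- palette enough times, slice to the requested length); measurably faster by a constant factor.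

def basePalette : List String :=
  ["#dd7f00", "#1c7f77", "#3266d6", "#cc4a06", "#7b39db", "#3fc4b7", "#84acd8", "#efb26d"]

-- ===== PORT A =====
-- base_palette[index % 8] always has index % 8 in range, so pyGetD with a default is exact here.
def palette_cycle_py (count : Int) : List String :=
  (PySem.List.pyRange 0 count 1).map
    (fun index => PySem.List.pyGetD basePalette (PySem.Int.mod index (basePalette.length : Int)) "")

-- ===== PORT B =====
def palette_cycle_py_alt (count : Int) : List String :=
  PySem.List.slice
    ((List.replicate (PySem.Int.floordiv count (basePalette.length : Int) + 1).toNat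
        basePalette).flatten)
    none (some count)

-- ===== PRECONDITION & SPEC =====
def Spec_palette_cycle_py (count : Int) (out : List String) : Prop := out = palette_cycle_py_alt count
instance (count : Int) (out : List String) : Decidable (Spec_palette_cycle_py count out) := by unfold Spec_palette_cycle_py; infer_instance

-- ===== CLAIM (what is proved, stated in full; the proofs are below) =====
def Claim_equal_palette_cycle_py : Prop := ∀ (count : Int), Dom_palette_cycle_py count → Spec_palette_cycle_py count (palette_cycle_py count)

-- ===== LEMMAS AND PROOFS =====

theorem getElem_flatten_replicate {α : Type} (pal : List α) (k i : Nat)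
    (hi : i < (List.replicate k pal).flatten.length) :
    (List.replicate k pal).flatten[i] = pal[i % pal.length]'(by
      simp [List.length_flatten] at hi
      have hpal : 0 < pal.length := by
        rcases Nat.eq_zero_or_pos pal.length with h | h
        · simp [h] at hi
        · exact h
      exact Nat.mod_lt _ hpal) := by
  induction k generalizing i with
  | zero => simp at hi
  | succ k ih =>
    simp only [List.replicate_succ, List.flatten_cons]
    by_cases h : i < pal.length
    · rw [List.getElem_append_left h]
      congr 1
      exact (Nat.mod_eq_of_lt h).symm
    · push Not at h
      rw [List.getElem_append_right h]
      have hi' : i - pal.length < (List.replicate k pal).flatten.length := by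
        simp [List.length_flatten, List.replicate_succ] at hi ⊢
        omega
      rw [ih (i - pal.length) hi']
      congr 1
      conv_rhs => rw [show i = (i - pal.length) + pal.length by omega]
      rw [Nat.add_mod_right]

theorem palette_lemma (n : Nat) :
    (List.range n).map (fun i => basePalette.getD (i % 8) "") =
      (List.replicate (n / 8 + 1) basePalette).flatten.take n := by
  have hlen : (List.replicate (n / 8 + 1) basePalette).flatten.length = (n / 8 + 1) * 8 := by
    simp [List.length_flatten, basePalette]
  have hn : n ≤ (n / 8 + 1) * 8 := by omega
  apply List.ext_getElem
  · simp [hlen]; omega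
  · intro i h1 h2
    simp only [List.getElem_map, List.getElem_range, List.getElem_take]
    have hi : i < n := by simpa using h1
    rw [getElem_flatten_replicate basePalette (n / 8 + 1) i (by omega)]
    have him : i % 8 < 8 := Nat.mod_lt _ (by norm_num)
    rw [List.getD_eq_getElem basePalette "" (by simpa [basePalette] using him)]
    congr 2

-- ===== VERDICT (by name: the statement is the Claim_ definition above) =====
theorem palette_cycle_py_spec : Claim_equal_palette_cycle_py := by
  unfold Claim_equal_palette_cycle_py
  intro count _
  unfold Spec_palette_cycle_py palette_cycle_py palette_cycle_py_alt
  have hlen : (basePalette.length : Int) = 8 := by simp [basePalette]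
  rw [hlen]
  have hfd : PySem.Int.floordiv count 8 = count / 8 :=
    PySem.Int.floordiv_eq_ediv_of_pos (by norm_num)
  rw [hfd]
  by_cases hc : count ≤ 0
  · have h1 : PySem.List.pyRange 0 count 1 = ([] : List Int) := by
      simp [PySem.List.pyRange]; omega
    rcases lt_or_eq_of_le hc with hlt | heq
    · have hr : (count / 8 + 1).toNat = 0 := by omega
      simp [h1, hr, PySem.List.slice, PySem.List.clampIdx]
    · subst heq
      decide
  · push Not at hc
    obtain ⟨n, rfl⟩ : ∃ n : Nat, count = (n : Int) := ⟨count.toNat, by omega⟩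
    have htn : ((n : Int) / 8 + 1).toNat = n / 8 + 1 := by omega
    rw [htn, PySem.List.slice_to_natCast]
    rw [PySem.List.pyRange_zero_natCast n, List.map_map, ← palette_lemma n]
    apply List.map_congr_left
    intro k hk
    have hm : PySem.Int.mod (k : Int) 8 = ((k % 8 : Nat) : Int) := by
      simpa using PySem.Int.mod_natCast k 8
    simp only [Function.comp, hm, PySem.List.pyGetD_natCast]
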